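-- pv_equiv track=rewrite | github.com/philippeschoeb/reproduced_papers | HQNN_MythOrReality/test_perf.py | generate_all_fock_states
-- ===== SOURCE A (Python) =====
-- from itertools import combinations
--
-- def generate_all_fock_states(m, n, no_bunching=False):
--     """Generates all possible Fock states for m modes and n photons."""
--     if no_bunching:
--         if n > m or n < 0:
--             return
--         for positions in combinations(range(m), n):
--             fock_state = [0] * m
--
--             for pos in positions:
--                 fock_state[pos] = 1
--             yield tuple(fock_state)
--
--     else:
--         if n == 0:
--             yield (0,) * m
--             return
--         if m == 1:
--             yield (n,)
--             return
--
--         for i in reversed(range(n + 1)):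
--             for state in generate_all_fock_states(m - 1, n - i):
--                 yield (i,) + state
-- ===== SOURCE B (Python) =====
-- from itertools import combinations
--
-- def generate_all_fock_states(m, n, no_bunching=False):
--     """Generates all possible Fock states for m modes and n photons (stars and bars)."""
--     if no_bunching:
--         if n > m or n < 0:
--             return
--         for positions in combinations(range(m), n):
--             fock_state = [0] * m
--             for pos in positions:
--                 fock_state[pos] = 1
--             yield tuple(fock_state)
--     else:
--         if n == 0:
--             yield (0,) * m
--             return
--         if n < 0:
--             return
--         # stars and bars: a state of n photons in m modes = m-1 bar positions
--         # among n+m-1 slots; parts are the gaps between consecutive bars.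
--         total = n + m - 1
--         for bars in reversed(list(combinations(range(total), m - 1))):
--             parts = []
--             prev = -1
--             for b in bars:
--                 parts.append(b - prev - 1)
--                 prev = b
--             parts.append(total - prev - 1)
--             yield tuple(parts)
-- ===== Notes on version B (the rewrite author's own statement) =====
-- stated objective: alternative
-- what changed: The bunching branch's recursion over modes is replaced by a non-recursive stars-and-bars enumeration: each state is read off as the gaps of one combination of bar positions, with the combinations list reversed to reproduce A's descending-lexicographic order.
-- intended difference: For m == 1, n < 0 (and bunching allowed) A returns the nonsensical single state (n,) with a negative photon count because its m==1 base case fires before any sign check, while B returns no states, consistent with A's own result for every other m when n < 0. — e.g. on generate_all_fock_states(1, -1, false): A returns [[-1]], B returns []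
import Mathlib
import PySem

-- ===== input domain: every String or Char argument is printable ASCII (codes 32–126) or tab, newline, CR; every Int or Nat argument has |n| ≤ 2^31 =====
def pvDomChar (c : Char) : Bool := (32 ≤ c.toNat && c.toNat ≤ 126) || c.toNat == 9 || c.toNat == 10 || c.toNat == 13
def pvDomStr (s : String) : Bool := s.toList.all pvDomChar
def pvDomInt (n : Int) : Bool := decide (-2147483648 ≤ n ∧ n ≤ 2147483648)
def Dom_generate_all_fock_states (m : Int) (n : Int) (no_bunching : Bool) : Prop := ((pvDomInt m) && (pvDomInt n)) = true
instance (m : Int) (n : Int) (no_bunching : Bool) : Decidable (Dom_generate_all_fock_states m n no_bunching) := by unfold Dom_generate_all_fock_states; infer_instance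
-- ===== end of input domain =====

-- B replaces A's recursion over modes by a stars-and-bars enumeration (gaps of reversed
-- bar combinations); for m == 1, n < 0 A returns the nonsensical state (n,) with a negative
-- photon count while B returns no states (stated as the intended difference D_ below).


-- ===== PORT A =====
-- itertools.combinations (same order as PySem.List.combinations, see pyComb_eq below) with
-- the usual length pruning so that #eval terminates quickly whenever the output is small
def pyComb {α : Type} : List α → Nat → List (List α)
  | _, 0 => [[]]
  | [], _ + 1 => []
  | x :: tl, r + 1 =>
    if tl.length < r then []
    else (pyComb tl r).map (x :: ·) ++ pyComb tl (r + 1)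

-- helper shared by both ports: the no_bunching branch's body "[0]*m with 1s at positions"
def fsRow (m : Int) (positions : List Int) : List Int :=
  positions.foldl (fun fs pos => fs.set pos.toNat 1) (List.replicate m.toNat 0)

-- the else branch's recursion, with fuel making termination explicit (the Python recursion
-- bottoms out only for m ≥ 1 or n ≤ 0; elsewhere it raises RecursionError, excluded by Pre_)
def fockAux : Nat → Int → Int → List (List Int)
  | 0, _, _ => []
  | fuel + 1, m, n =>
    if n == 0 then [List.replicate m.toNat 0]
    else if m == 1 then [[n]]
    else (PySem.List.pyRange 0 (n + 1) 1).reverse.flatMap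
      (fun i => (fockAux fuel (m - 1) (n - i)).map (i :: ·))

def generate_all_fock_states (m : Int) (n : Int) (no_bunching : Bool) : List (List Int) :=
  if no_bunching then
    if n > m ∨ n < 0 then []
    else (pyComb (PySem.List.pyRange 0 m 1) n.toNat).map (fsRow m)
  else fockAux (m.toNat + 1) m n

-- ===== PORT B =====
-- gaps between consecutive bar positions (prev starts at -1), plus the final gap
def gapsOf (total : Int) (bars : List Int) : List Int :=
  let st := bars.foldl (fun (st : List Int × Int) b => (st.1 ++ [b - st.2 - 1], b)) ([], -1)
  st.1 ++ [total - st.2 - 1]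

def generate_all_fock_states_alt (m : Int) (n : Int) (no_bunching : Bool) : List (List Int) :=
  if no_bunching then
    if n > m ∨ n < 0 then []
    else (pyComb (PySem.List.pyRange 0 m 1) n.toNat).map (fsRow m)
  else if n == 0 then [List.replicate m.toNat 0]
  else if n < 0 then []
  else ((pyComb (PySem.List.pyRange 0 (n + m - 1) 1) (m - 1).toNat).reverse).map
    (gapsOf (n + m - 1))

-- ===== PRECONDITION & SPEC =====
-- Pre_ excludes exactly the inputs where A raises RecursionError (bunching branch with
-- m ≤ 0 and n ≥ 1: the recursion on m-1 never reaches a base case).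
def Pre_generate_all_fock_states (m : Int) (n : Int) (no_bunching : Bool) : Prop :=
  no_bunching = true ∨ 1 ≤ m ∨ n ≤ 0
instance (m : Int) (n : Int) (no_bunching : Bool) : Decidable (Pre_generate_all_fock_states m n no_bunching) := by unfold Pre_generate_all_fock_states; infer_instance
def pvWitness_generate_all_fock_states : Int × Int × Bool := (3, 2, false)

-- For m == 1, n < 0 (bunching branch) A returns the nonsensical single state (n,) with a
-- negative photon count because its m==1 base case fires before any sign check; B returns
-- no states, consistent with A's own result for every other m when n < 0.
def D_generate_all_fock_states (m : Int) (n : Int) (no_bunching : Bool) : Prop :=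
  no_bunching = false ∧ m = 1 ∧ n < 0
instance (m : Int) (n : Int) (no_bunching : Bool) : Decidable (D_generate_all_fock_states m n no_bunching) := by unfold D_generate_all_fock_states; infer_instance

def Spec_generate_all_fock_states (m : Int) (n : Int) (no_bunching : Bool) (out : List (List Int)) : Prop := ¬ D_generate_all_fock_states m n no_bunching → out = generate_all_fock_states_alt m n no_bunching
instance (m : Int) (n : Int) (no_bunching : Bool) (out : List (List Int)) : Decidable (Spec_generate_all_fock_states m n no_bunching out) := by unfold Spec_generate_all_fock_states; infer_instance

def pvDiffWitness_generate_all_fock_states : Int × Int × Bool := (1, -1, false)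
def pvDiffWitnessOut_generate_all_fock_states : (List (List Int)) × (List (List Int)) := ([[-1]], [])

-- ===== CLAIM (what is proved, stated in full; the proofs are below) =====
def Claim_unchanged_generate_all_fock_states : Prop := ∀ (m : Int) (n : Int) (no_bunching : Bool), Dom_generate_all_fock_states m n no_bunching → Pre_generate_all_fock_states m n no_bunching → Spec_generate_all_fock_states m n no_bunching (generate_all_fock_states m n no_bunching)
def Claim_changed_generate_all_fock_states : Prop := Dom_generate_all_fock_states (pvDiffWitness_generate_all_fock_states.1) (pvDiffWitness_generate_all_fock_states.2.1) (pvDiffWitness_generate_all_fock_states.2.2) ∧ Pre_generate_all_fock_states (pvDiffWitness_generate_all_fock_states.1) (pvDiffWitness_generate_all_fock_states.2.1) (pvDiffWitness_generate_all_fock_states.2.2) ∧ D_generate_all_fock_states (pvDiffWitness_generate_all_fock_states.1) (pvDiffWitness_generate_all_fock_states.2.1) (pvDiffWitness_generate_all_fock_states.2.2) ∧ generate_all_fock_states (pvDiffWitness_generate_all_fock_states.1) (pvDiffWitness_generate_all_fock_states.2.1) (pvDiffWitness_generate_all_fock_states.2.2) = pvDiffWitnessOut_generate_all_fock_states.1 ∧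 generate_all_fock_states_alt (pvDiffWitness_generate_all_fock_states.1) (pvDiffWitness_generate_all_fock_states.2.1) (pvDiffWitness_generate_all_fock_states.2.2) = pvDiffWitnessOut_generate_all_fock_states.2 ∧ pvDiffWitnessOut_generate_all_fock_states.1 ≠ pvDiffWitnessOut_generate_all_fock_states.2
def Claim_exact_generate_all_fock_states : Prop := ∀ (m : Int) (n : Int) (no_bunching : Bool), Dom_generate_all_fock_states m n no_bunching → Pre_generate_all_fock_states m n no_bunching → D_generate_all_fock_states m n no_bunching → generate_all_fock_states m n no_bunching ≠ generate_all_fock_states_alt m n no_bunching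

-- ===== LEMMAS AND PROOFS =====

-- the pruned combinations computes exactly itertools.combinations' list
lemma pyComb_eq {α : Type} : ∀ (xs : List α) (r : Nat),
    pyComb xs r = PySem.List.combinations xs r := by
  intro xs
  induction xs with
  | nil =>
      intro r
      cases r with
      | zero => simp [pyComb, PySem.List.combinations_zero]
      | succ r => simp [pyComb, PySem.List.combinations_nil_succ]
  | cons x tl ih =>
      intro r
      cases r with
      | zero => simp [pyComb, PySem.List.combinations_zero]
      | succ r =>
          rw [PySem.List.combinations_cons_succ, pyComb]
          split_ifs with h
          · have h1 : PySem.List.combinations tl r = [] :=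
              PySem.List.combinations_eq_nil_of_length_lt tl h
            have h2 : PySem.List.combinations tl (r + 1) = [] :=
              PySem.List.combinations_eq_nil_of_length_lt tl (by omega)
            rw [h1, h2]
            simp
          · rw [ih, ih]

-- recursive characterization of gapsOf
def gapsRec (prev total : Int) : List Int → List Int
  | [] => [total - prev - 1]
  | b :: bs => (b - prev - 1) :: gapsRec b total bs

lemma gaps_foldl (total : Int) :
    ∀ (bars : List Int) (acc : List Int) (prev : Int),
      (let st := bars.foldl (fun (st : List Int × Int) b => (st.1 ++ [b - st.2 - 1], b)) (acc, prev)
       st.1 ++ [total - st.2 - 1]) = acc ++ gapsRec prev total bars := by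
  intro bars
  induction bars with
  | nil => intro acc prev; simp [gapsRec]
  | cons b bs ih =>
      intro acc prev
      simp only [List.foldl_cons, gapsRec]
      rw [ih]
      simp

lemma gapsOf_eq_gapsRec (total : Int) (bars : List Int) :
    gapsOf total bars = gapsRec (-1) total bars := by
  simpa [gapsOf] using gaps_foldl total bars [] (-1)

lemma gapsRec_shift (total s : Int) :
    ∀ (bs : List Int) (prev : Int),
      gapsRec (prev + s) total (bs.map (· + s)) = gapsRec prev (total - s) bs := by
  intro bs
  induction bs with
  | nil => intro prev; simp [gapsRec]; ring
  | cons b bs ih =>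
      intro prev
      simp only [List.map_cons, gapsRec]
      rw [show b + s - (prev + s) - 1 = b - prev - 1 by ring, ih b]

lemma gapsRec_range (k : Nat) :
    ∀ prev : Int, gapsRec prev (prev + k + 1) (PySem.List.pyRange (prev + 1) (prev + 1 + k) 1)
      = List.replicate (k + 1) 0 := by
  induction k with
  | zero =>
      intro prev
      rw [show prev + 1 + (0:Nat) = prev + 1 by push_cast; ring, PySem.List.pyRange_one_eq_nil le_rfl]
      simp [gapsRec]
  | succ k ih =>
      intro prev
      rw [PySem.List.pyRange_one_cons (by push_cast; omega)]
      simp only [gapsRec]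
      rw [show prev + 1 - prev - 1 = (0:Int) by ring,
          show prev + 1 + ((k+1:Nat):Int) = (prev + 1) + 1 + k by push_cast; ring,
          show prev + ((k+1:Nat):Int) + 1 = (prev + 1) + k + 1 by push_cast; ring,
          ih (prev + 1)]
      simp [List.replicate_succ]

-- the stars-and-bars list (ascending-lexicographic)
def sbList (m n : Int) : List (List Int) :=
  (PySem.List.combinations (PySem.List.pyRange 0 (n + m - 1) 1) (m - 1).toNat).map
    (gapsOf (n + m - 1))

def incHead : List Int → List Int
  | [] => []
  | x :: xs => (x + 1) :: xs

lemma pyRange_succ_shift (b : Int) :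
    PySem.List.pyRange 1 (b + 1) 1 = (PySem.List.pyRange 0 b 1).map (· + 1) := by
  rw [PySem.List.pyRange_one, PySem.List.pyRange_one]
  rw [show b + 1 - 1 = b - 0 by ring, List.map_map]
  apply List.map_congr_left
  intro a _
  simp; ring

lemma sbList_one (n : Int) : sbList 1 n = [[n]] := by
  simp [sbList, PySem.List.combinations_zero, gapsOf]

lemma sbList_zero (m : Int) (hm : 1 ≤ m) : sbList m 0 = [List.replicate m.toNat 0] := by
  unfold sbList
  have hlen : (PySem.List.pyRange 0 (0 + m - 1) 1).length = (m - 1).toNat := by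
    rw [PySem.List.length_pyRange_one]; omega
  rw [← hlen, PySem.List.combinations_length_self]
  rw [List.map_singleton, gapsOf_eq_gapsRec]
  have h := gapsRec_range (m - 1).toNat (-1)
  rw [Int.toNat_of_nonneg (by omega : (0:Int) ≤ m - 1)] at h
  rw [show (-1:Int) + (m - 1) + 1 = 0 + m - 1 by ring, show (-1:Int) + 1 = 0 by ring,
      show (0:Int) + (m - 1) = 0 + m - 1 by ring] at h
  rw [h, show (m-1).toNat + 1 = m.toNat by omega]

lemma sbList_rec (m n : Int) (hm : 2 ≤ m) (hn : 1 ≤ n) :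
    sbList m n = ((sbList (m - 1) n).map (0 :: ·)) ++ ((sbList m (n - 1)).map incHead) := by
  unfold sbList
  have hN : (0:Int) < n + m - 1 := by omega
  have hr : (m - 1).toNat = (m - 2).toNat + 1 := by omega
  rw [hr, PySem.List.pyRange_one_cons hN, PySem.List.combinations_cons_succ]
  rw [show (0:Int) + 1 = 1 by ring, show n + m - 1 = (n + m - 2) + 1 by ring, pyRange_succ_shift,
      PySem.List.combinations_map, PySem.List.combinations_map]
  rw [show n + (m - 1) - 1 = n + m - 2 + 1 - 1 by ring, show (n - 1) + m - 1 = n + m - 2 + 1 - 1 by ring,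
      show m - 1 - 1 = m - 2 by ring]
  rw [show n + m - 2 + 1 - 1 = n + m - 2 by ring]
  simp only [List.map_append, List.map_map]
  congr 1
  · -- first group: bars containing 0 (first part is 0)
    apply List.map_congr_left
    intro c hc
    simp only [Function.comp]
    rw [gapsOf_eq_gapsRec, gapsOf_eq_gapsRec]
    show gapsRec (-1) ((n+m-2)+1) (0 :: c.map (· + 1)) = 0 :: gapsRec (-1) (n + m - 2) c
    rw [show gapsRec (-1) ((n+m-2)+1) (0 :: c.map (· + 1))
          = (0 - (-1) - 1) :: gapsRec 0 ((n+m-2)+1) (c.map (· + 1)) from rfl]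
    rw [show (0:Int) - (-1) - 1 = 0 by ring, show (0:Int) = -1 + 1 by ring]
    rw [gapsRec_shift]
    rw [show (n+m-2) + 1 - 1 = n + m - 2 by ring]
  · -- second group: bars all shifted by 1 (first part is incremented)
    apply List.map_congr_left
    intro c hc
    simp only [Function.comp]
    have hne : c ≠ [] := by
      have := PySem.List.length_of_mem_combinations hc
      intro h; rw [h] at this; simp at this
    obtain ⟨b, bs, rfl⟩ := List.exists_cons_of_ne_nil hne
    rw [gapsOf_eq_gapsRec, gapsOf_eq_gapsRec]
    show gapsRec (-1) ((n+m-2)+1) ((b+1) :: bs.map (· + 1)) = incHead (gapsRec (-1) (n + m - 2) (b :: bs))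
    rw [show gapsRec (-1) ((n+m-2)+1) ((b+1) :: bs.map (· + 1))
          = (b + 1 - (-1) - 1) :: gapsRec (b+1) ((n+m-2)+1) (bs.map (· + 1)) from rfl]
    rw [show gapsRec (-1) (n + m - 2) (b :: bs)
          = (b - (-1) - 1) :: gapsRec b (n + m - 2) bs from rfl]
    show _ = ((b - (-1) - 1) + 1) :: gapsRec b (n + m - 2) bs
    rw [show b + 1 - (-1) - 1 = (b - (-1) - 1) + 1 from by ring]
    congr 1
    have := gapsRec_shift ((n+m-2)+1) 1 bs b
    rw [show (n+m-2) + 1 - 1 = n + m - 2 by ring] at this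
    simpa using this

lemma sbList_grouped (m : Int) (hm : 2 ≤ m) : ∀ (nk : Nat),
    (sbList m (nk : Int)).reverse =
      (PySem.List.pyRange 0 ((nk : Int) + 1) 1).reverse.flatMap
        (fun i => ((sbList (m - 1) ((nk : Int) - i)).reverse).map (i :: ·)) := by
  intro nk
  induction nk with
  | zero =>
      rw [Nat.cast_zero, PySem.List.pyRange_one_singleton]
      simp only [List.reverse_cons, List.reverse_nil, List.nil_append, List.flatMap_cons,
        List.flatMap_nil, List.append_nil]
      rw [sbList_zero m (by omega), show (0:Int) - 0 = 0 by ring, sbList_zero (m-1) (by omega)]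
      simp only [List.reverse_singleton, List.map_singleton]
      rw [show m.toNat = (m-1).toNat + 1 by omega, List.replicate_succ]
  | succ nk ih =>
      have hcast : ((nk + 1 : Nat) : Int) = (nk : Int) + 1 := by push_cast; ring
      rw [hcast]
      rw [sbList_rec m ((nk:Int)+1) hm (by omega)]
      rw [show (nk:Int) + 1 - 1 = (nk:Int) by ring]
      rw [List.reverse_append]
      simp only [← List.map_reverse]
      rw [ih, List.map_flatMap]
      rw [PySem.List.pyRange_one_cons (show (0:Int) < (nk:Int) + 1 + 1 by omega)]
      rw [show (0:Int) + 1 = 1 by norm_num]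
      rw [List.reverse_cons, List.flatMap_append, List.flatMap_cons, List.flatMap_nil,
        List.append_nil]
      rw [show (nk:Int) + 1 - 0 = (nk:Int) + 1 by ring]
      rw [show (nk:Int) + 1 + 1 = ((nk:Int) + 1) + 1 from rfl, pyRange_succ_shift]
      simp only [← List.map_reverse, List.flatMap_map, List.map_map]
      congr 1
      apply List.flatMap_congr
      intro i hi
      rw [show (nk:Int) + 1 - (i + 1) = (nk:Int) - i by ring]
      rfl

lemma fockAux_eq_sbList :
    ∀ (fuel : Nat) (m n : Int), 1 ≤ m → 0 ≤ n → m.toNat ≤ fuel →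
      fockAux fuel m n = (sbList m n).reverse := by
  intro fuel
  induction fuel with
  | zero => intro m n hm hn hf; omega
  | succ fuel ih =>
      intro m n hm hn hf
      by_cases hn0 : n = 0
      · subst hn0
        simp only [fockAux, beq_self_eq_true, if_true]
        rw [sbList_zero m hm, List.reverse_singleton]
      · by_cases hm1 : m = 1
        · subst hm1
          simp only [fockAux, beq_iff_eq, hn0, if_false, if_true]
          rw [sbList_one, List.reverse_singleton]
        · have hm2 : 2 ≤ m := by omega
          simp only [fockAux, beq_iff_eq, hn0, hm1, if_false]
          have hcast : ((n.toNat : Int)) = n := Int.toNat_of_nonneg hn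
          rw [show n = (n.toNat : Int) from hcast.symm, sbList_grouped m hm2 n.toNat]
          apply List.flatMap_congr
          intro i hi
          rw [List.mem_reverse, PySem.List.mem_pyRange_one] at hi
          rw [ih (m - 1) ((n.toNat : Int) - i) (by omega) (by omega) (by omega)]

-- ===== VERDICT (by name: the statement is the Claim_ definition above) =====
theorem generate_all_fock_states_spec : Claim_unchanged_generate_all_fock_states := by
  intro m n nb _ hPre
  unfold Spec_generate_all_fock_states
  intro hD
  cases nb
  · -- bunching branch
    have hPre' : 1 ≤ m ∨ n ≤ 0 := by
      rcases hPre with h | h | h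
      · exact absurd h (by simp)
      · exact Or.inl h
      · exact Or.inr h
    have hD' : ¬ (m = 1 ∧ n < 0) := fun ⟨h1, h2⟩ => hD ⟨rfl, h1, h2⟩
    show fockAux (m.toNat + 1) m n = generate_all_fock_states_alt m n false
    by_cases hn0 : n = 0
    · subst hn0
      simp [generate_all_fock_states_alt, fockAux]
    · by_cases hneg : n < 0
      · have hm1 : m ≠ 1 := fun h => hD' ⟨h, hneg⟩
        simp only [fockAux, beq_iff_eq, hn0, hm1, if_false]
        rw [PySem.List.pyRange_one_eq_nil (by omega)]
        simp [generate_all_fock_states_alt, hn0, hneg]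
      · have hn : 0 ≤ n := by omega
        have hm : 1 ≤ m := by
          rcases hPre' with h | h
          · exact h
          · omega
        rw [fockAux_eq_sbList (m.toNat + 1) m n hm hn (by omega)]
        unfold sbList
        simp [generate_all_fock_states_alt, hn0, hneg, List.map_reverse, pyComb_eq]
  · -- no_bunching branch: both ports run the identical code
    rfl

theorem generate_all_fock_states_changed : Claim_changed_generate_all_fock_states := by
  unfold Claim_changed_generate_all_fock_states; decide

theorem generate_all_fock_states_tight : Claim_exact_generate_all_fock_states := by
  intro m n nb _ _ hD
  obtain ⟨hnb, hm, hn⟩ := hD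
  subst hnb; subst hm
  show fockAux ((1:Int).toNat + 1) 1 n ≠ generate_all_fock_states_alt 1 n false
  have hA : fockAux ((1:Int).toNat + 1) 1 n = [[n]] := by
    simp [fockAux, show n ≠ 0 by omega]
  have hB : generate_all_fock_states_alt 1 n false = [] := by
    simp [generate_all_fock_states_alt, show n ≠ 0 by omega, hn]
  rw [hA, hB]
  simp
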